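-- pv_equiv track=rewrite | github.com/daniel-reich/turbo-robot | W3Hptw6ieTtrWNw4H_21.py | bifid
-- ===== SOURCE A (Python) =====
-- def bifid(text):
--     enc_flag = False
--     for ele in text:
--         if not ele.isalpha():
--             enc_flag = True
--             break
--     coding_list = [chr(i) for i in range(ord('a'),ord('z')+1) if i != ord('j')]
--     coding_table = {e:(i//5, i%5) for i,e in enumerate(coding_list)}
--     coding_table_inverse = {coding_table[i]:i for i in coding_table}
--     if enc_flag:
--         new_text = ''.join([i.lower() for i in text if i.isalpha()])
--         result_code_list = []
--         for e in new_text: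
--             e = e.lower()
--             if e == 'j':
--                 e = 'i'
--             result_code_list.append(coding_table[e])
--         temp_list = [e[i] for i in range(2) for e in result_code_list]
--         result = ''.join([coding_table_inverse[(temp_list[i], temp_list[i+1])] for i in range(0, len(temp_list), 2)])
--     else:
--         result_code_list = []
--         for e in text:
--             code = coding_table[e]
--             result_code_list.append(code[0])
--             result_code_list.append(code[1])
--         temp_list = []
--         length = len(result_code_list)
--         for i in range(length//2):
--             temp_list.append(result_code_list[i])
--             temp_list.append(result_code_list[i+length//2])
--         result = ''.join([coding_table_inverse[(temp_list[i], temp_list[i+1])] for i in range(0, len(temp_list), 2)])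
--
--     return result
-- ===== SOURCE B (Python) =====
-- def bifid(text):
--     # No coordinate tables and no intermediate coordinate lists: coordinates come
--     # from character-code arithmetic and each output letter is computed directly
--     # by index arithmetic into the (virtual) coordinate stream.
--     def coord(c):
--         i = ord(c) - ord('a') - (c > 'i')
--         return divmod(i, 5)
--
--     def letter(r, c):
--         i = 5 * r + c
--         return chr(ord('a') + i + (i > 8))
--
--     if all(c.isalpha() for c in text):
--         # decode: flat coords F[j] = coord(text[j//2])[j%2]; output k pairs F[k] with F[k+n]
--         n = len(text)
--         def f(j):
--             return coord(text[j // 2])[j % 2]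
--         return ''.join(letter(f(k), f(k + n)) for k in range(n))
--     else:
--         # encode: virtual stream S[j] = coord(letters[j%n])[j//n]; output k pairs S[2k], S[2k+1]
--         letters = ['i' if c.lower() == 'j' else c.lower() for c in text if c.isalpha()]
--         n = len(letters)
--         def g(j):
--             return coord(letters[j % n])[j // n]
--         return ''.join(letter(g(2 * k), g(2 * k + 1)) for k in range(n))
-- ===== Notes on version B (the rewrite author's own statement) =====
-- stated objective: alternative
-- what changed: Eliminates A's coordinate dictionary, inverse dictionary and all intermediate coordinate/transposition lists: coordinates are computed by character-code arithmetic (ord/chr with a skip-'j' offset) and each output letter is obtained directly by index arithmetic into the virtual coordinate stream (S[j]=coord(letters[j%n])[j//n], F[j]=coord(text[j//2])[j%2]).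
import Mathlib
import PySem

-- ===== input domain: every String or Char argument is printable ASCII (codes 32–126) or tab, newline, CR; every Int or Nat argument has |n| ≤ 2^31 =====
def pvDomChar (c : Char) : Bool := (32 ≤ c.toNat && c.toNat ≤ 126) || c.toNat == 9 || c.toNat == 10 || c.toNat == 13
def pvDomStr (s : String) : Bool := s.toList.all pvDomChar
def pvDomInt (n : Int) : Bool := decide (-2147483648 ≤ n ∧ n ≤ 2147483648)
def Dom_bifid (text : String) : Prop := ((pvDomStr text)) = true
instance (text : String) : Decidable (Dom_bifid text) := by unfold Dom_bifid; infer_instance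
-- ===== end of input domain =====

-- B drops A's coordinate dictionary, inverse dictionary and all intermediate coordinate /
-- transposition lists: coordinates come from character-code arithmetic and each output letter
-- is computed directly by index arithmetic into the virtual coordinate stream (objective: alternative).

-- ===== PORT A =====
-- coding_list = [chr(i) for i in range(ord('a'), ord('z')+1) if i != ord('j')]
def bifidCodingList : List Char :=
  ((PySem.List.pyRange 97 123 1).filter (fun i => decide (i ≠ 106))).map (fun i => Char.ofNat i.toNat)

-- coding_table = {e: (i//5, i%5) for i, e in enumerate(coding_list)}
def bifidTable : PySem.Dict Char (Int × Int) :=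
  (PySem.List.enumerate bifidCodingList).foldl
    (fun d p => d.insert p.2 (PySem.Int.floordiv p.1 5, PySem.Int.mod p.1 5)) PySem.Dict.empty

-- coding_table_inverse = {coding_table[i]: i for i in coding_table}  (lookup of a key of the
-- dict itself never fails, so getD is exact here)
def bifidTableInv : PySem.Dict (Int × Int) Char :=
  bifidTable.keys.foldl (fun d k => d.insert (bifidTable.getD k (0, 0)) k) PySem.Dict.empty

def bifid (text : String) : String :=
  -- the for/break loop setting enc_flag (no state survives the break, so the
  -- break-free fold computes the same flag)
  let enc_flag := text.toList.foldl
    (fun flag ele => if !(PySem.Chars.isalpha ele) then true else flag) false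
  if enc_flag then
    let new_text := (text.toList.filter (fun i => PySem.Chars.isalpha i)).map
      (fun i => PySem.Chars.lowerChar i)
    let rcl := new_text.foldl (fun acc e =>
      let e1 := PySem.Chars.lowerChar e
      let e2 := if e1 = 'j' then 'i' else e1
      acc ++ [bifidTable.getD e2 ((0 : Int), (0 : Int))]) []  -- KeyError impossible: e2 is a key
    -- temp_list = [e[i] for i in range(2) for e in result_code_list]; e[i] on the pair is .1/.2
    let temp := (PySem.List.pyRange 0 2 1).flatMap
      (fun i => rcl.map (fun e => if i = 0 then e.1 else e.2))
    String.ofList ((PySem.List.pyRange 0 ((temp.length : Int)) 2).map (fun i =>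
      bifidTableInv.getD (PySem.List.pyGetD temp i 0, PySem.List.pyGetD temp (i + 1) 0) 'a'))
  else
    let rcl := text.toList.foldl (fun acc e =>
      -- coding_table[e]: KeyError (on 'j', uppercase) excluded by Pre_
      let code := bifidTable.getD e ((0 : Int), (0 : Int))
      (acc ++ [code.1]) ++ [code.2]) []
    let length : Int := (rcl.length : Int)
    let temp := (PySem.List.pyRange 0 (PySem.Int.floordiv length 2) 1).foldl (fun acc i =>
      (acc ++ [PySem.List.pyGetD rcl i 0]) ++
        [PySem.List.pyGetD rcl (i + PySem.Int.floordiv length 2) 0]) []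
    String.ofList ((PySem.List.pyRange 0 ((temp.length : Int)) 2).map (fun i =>
      bifidTableInv.getD (PySem.List.pyGetD temp i 0, PySem.List.pyGetD temp (i + 1) 0) 'a'))

-- ===== PORT B =====
-- def coord(c): i = ord(c) - ord('a') - (c > 'i'); return divmod(i, 5)
def bifidCoord (c : Char) : Int × Int :=
  let i : Int := (c.toNat : Int) - 97 - (if 'i' < c then 1 else 0)
  (PySem.Int.floordiv i 5, PySem.Int.mod i 5)

-- def letter(r, c): i = 5*r + c; return chr(ord('a') + i + (i > 8))
-- (chr is exact on the in-range codes B ever produces inside Pre_)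
def bifidLetter (r c : Int) : Char :=
  let i := 5 * r + c
  Char.ofNat (97 + i + (if 8 < i then 1 else 0)).toNat

def bifid_alt (text : String) : String :=
  let cs := text.toList
  if cs.all (fun c => PySem.Chars.isalpha c) then
    -- decode: f(j) = coord(text[j//2])[j%2]; output k pairs f(k) with f(k+n)
    let n : Int := (cs.length : Int)
    let f : Int → Int := fun j =>
      let p := bifidCoord (PySem.List.pyGetD cs (PySem.Int.floordiv j 2) 'a')
      if PySem.Int.mod j 2 = 0 then p.1 else p.2
    String.ofList ((PySem.List.pyRange 0 n 1).map (fun k => bifidLetter (f k) (f (k + n))))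
  else
    -- encode: g(j) = coord(letters[j % n])[j // n]; output k pairs g(2k) with g(2k+1)
    let letters := (cs.filter (fun c => PySem.Chars.isalpha c)).map
      (fun c => if PySem.Chars.lowerChar c = 'j' then 'i' else PySem.Chars.lowerChar c)
    let n : Int := (letters.length : Int)
    let g : Int → Int := fun j =>
      let p := bifidCoord (PySem.List.pyGetD letters (PySem.Int.mod j n) 'a')
      if PySem.Int.floordiv j n = 0 then p.1 else p.2
    String.ofList ((PySem.List.pyRange 0 n 1).map (fun k =>
      bifidLetter (g (2 * k)) (g (2 * k + 1))))

-- ===== PRECONDITION & SPEC =====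
-- Pre_ excludes exactly the inputs on which the Python A raises KeyError: all-alphabetic
-- text (the decode branch) containing a character outside the 25-letter table
-- ('j' or an uppercase letter).
def Pre_bifid (text : String) : Prop :=
  (text.toList.any (fun c => !PySem.Chars.isalpha c)) = true ∨
  (text.toList.all (fun c => decide (c ∈ "abcdefghiklmnopqrstuvwxyz".toList))) = true
instance (text : String) : Decidable (Pre_bifid text) := by unfold Pre_bifid; infer_instance
def pvWitness_bifid : String := "hello world"

def Spec_bifid (text : String) (out : String) : Prop := out = bifid_alt text
instance (text : String) (out : String) : Decidable (Spec_bifid text out) := by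
  unfold Spec_bifid; infer_instance

-- ===== CLAIM (what is proved, stated in full; the proofs are below) =====
def Claim_equal_bifid : Prop :=
  ∀ (text : String), Dom_bifid text → Pre_bifid text → Spec_bifid text (bifid text)

-- ===== LEMMAS AND PROOFS =====

theorem bifid_values_range :
    ∀ v ∈ bifidTable.values, 0 ≤ v.1 ∧ v.1 < 5 ∧ 0 ≤ v.2 ∧ v.2 < 5 := by decide

theorem bifid_getD_range (c : Char) :
    0 ≤ (bifidTable.getD c (0, 0)).1 ∧ (bifidTable.getD c (0, 0)).1 < 5 ∧
    0 ≤ (bifidTable.getD c (0, 0)).2 ∧ (bifidTable.getD c (0, 0)).2 < 5 := by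
  rw [PySem.Dict.getD_eq_get?_getD]
  cases hg : bifidTable.get? c with
  | none => simp
  | some v =>
    have hv : v ∈ bifidTable.values := by
      have h1 := PySem.Dict.mem_items_of_get?_eq_some bifidTable hg
      simp only [PySem.Dict.values, List.mem_map]
      exact ⟨(c, v), h1, rfl⟩
    simpa using bifid_values_range v hv

-- A's inverse-table lookup agrees with B's letter arithmetic on in-range coordinates
theorem inv_eq_letter : ∀ (r c : Int), 0 ≤ r → r < 5 → 0 ≤ c → c < 5 →
    bifidTableInv.getD (r, c) 'a' = bifidLetter r c := by
  have key : ∀ (a b : Fin 5),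
      bifidTableInv.getD (((a : Nat) : Int), ((b : Nat) : Int)) 'a'
        = bifidLetter ((a : Nat) : Int) ((b : Nat) : Int) := by decide
  intro r c h0 h1 h2 h3
  have hr : r = ((r.toNat : Nat) : Int) := (Int.toNat_of_nonneg h0).symm
  have hc : c = ((c.toNat : Nat) : Int) := (Int.toNat_of_nonneg h2).symm
  have hrn : r.toNat < 5 := by omega
  have hcn : c.toNat < 5 := by omega
  have hk := key ⟨r.toNat, hrn⟩ ⟨c.toNat, hcn⟩
  rw [hr, hc]
  exact hk

-- A's table lookup agrees with B's ord-arithmetic on every folded lowercase alpha char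
set_option maxRecDepth 40000 in
theorem charFacts : ∀ n < 123, PySem.Chars.isalpha (Char.ofNat n) = true →
    ((if PySem.Chars.lowerChar (Char.ofNat n) = 'j' then 'i'
        else PySem.Chars.lowerChar (Char.ofNat n)) ∈ bifidCodingList
     ∧ bifidTable.getD (if PySem.Chars.lowerChar (Char.ofNat n) = 'j' then 'i'
        else PySem.Chars.lowerChar (Char.ofNat n)) (0, 0)
       = bifidCoord (if PySem.Chars.lowerChar (Char.ofNat n) = 'j' then 'i'
        else PySem.Chars.lowerChar (Char.ofNat n))) := by decide

theorem alpha_lt (c : Char) (h : PySem.Chars.isalpha c = true) : c.toNat < 123 := by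
  simp [PySem.Chars.isalpha, PySem.Chars.islower, PySem.Chars.isupper] at h
  rcases h with ⟨_, h⟩ | ⟨_, h⟩
  · have h2 := UInt32.le_iff_toNat_le.mp ((Char.le_def).mp h)
    have hz : ('Z').val.toNat = 90 := rfl
    have he : c.toNat = c.val.toNat := rfl
    omega
  · have h2 := UInt32.le_iff_toNat_le.mp ((Char.le_def).mp h)
    have hz : ('z').val.toNat = 122 := rfl
    have he : c.toNat = c.val.toNat := rfl
    omega

theorem alpha_fold_facts (c : Char) (h : PySem.Chars.isalpha c = true) :
    (if PySem.Chars.lowerChar c = 'j' then 'i' else PySem.Chars.lowerChar c) ∈ bifidCodingList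
    ∧ bifidTable.getD (if PySem.Chars.lowerChar c = 'j' then 'i'
        else PySem.Chars.lowerChar c) (0, 0)
      = bifidCoord (if PySem.Chars.lowerChar c = 'j' then 'i' else PySem.Chars.lowerChar c) := by
  have he : Char.ofNat c.toNat = c := Char.ofNat_toNat c
  have := charFacts c.toNat (alpha_lt c h) (by rw [he]; exact h)
  rwa [he] at this

theorem coding_coord_all : (bifidCodingList.all
    (fun c => bifidTable.getD c (0, 0) == bifidCoord c)) = true := by decide

theorem coding_coord (c : Char) (h : c ∈ bifidCodingList) :
    bifidTable.getD c (0, 0) = bifidCoord c := by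
  have := List.all_eq_true.mp coding_coord_all c h
  exact beq_iff_eq.mp this

theorem coding_string_eq : "abcdefghiklmnopqrstuvwxyz".toList = bifidCodingList := by decide

theorem lowerChar_idem (c : Char) :
    PySem.Chars.lowerChar (PySem.Chars.lowerChar c) = PySem.Chars.lowerChar c := by
  unfold PySem.Chars.lowerChar
  by_cases h : PySem.Chars.isupper c = true
  · simp only [h, if_true]
    have hb : ('A' ≤ c ∧ c ≤ 'Z') := by
      simpa [PySem.Chars.isupper] using h
    have h1 : 65 ≤ c.toNat := hb.1
    have h2 : c.toNat ≤ 90 := hb.2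
    have hval : (c.toNat + 32).isValidChar := by left; omega
    have hv : (Char.ofNat (c.toNat + 32)).toNat = c.toNat + 32 := by
      rw [Char.toNat_ofNat, if_pos hval]
    have hnu : PySem.Chars.isupper (Char.ofNat (c.toNat + 32)) = false := by
      have hz : ('Z').toNat = 90 := rfl
      have : ¬ (Char.ofNat (c.toNat + 32) ≤ 'Z') := by
        show ¬ ((Char.ofNat (c.toNat + 32)).toNat ≤ ('Z').toNat)
        rw [hv, hz]; omega
      simp [PySem.Chars.isupper, this]
    simp [hnu]
  · simp only [h]
    simp [h]

-- length of the [f x, g x] flattening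
theorem flat2_length {α : Type} (f g : α → Int) :
    ∀ (l : List α), (l.flatMap (fun x => [f x, g x])).length = 2 * l.length
  | [] => by simp
  | x :: t => by simp [flat2_length f g t]; omega

-- the [f x, g x] flattening at even / odd positions
theorem flat2_getD {α : Type} (f g : α → Int) (d : α) :
    ∀ (l : List α) (k : Nat), k < l.length →
      (l.flatMap (fun x => [f x, g x])).getD (2 * k) 0 = f (l.getD k d)
      ∧ (l.flatMap (fun x => [f x, g x])).getD (2 * k + 1) 0 = g (l.getD k d)
  | x :: t, 0, _ => by simp
  | x :: t, k + 1, h => by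
      have ih := flat2_getD f g d t k (by simpa using h)
      have e1 : 2 * (k + 1) = 2 * k + 1 + 1 := by ring
      simp only [List.flatMap_cons, List.cons_append, List.nil_append, e1,
        List.getD_cons_succ, List.getD_cons_succ]
      exact ih

theorem flat2_getD_any {α : Type} (f g : α → Int) (d : α) (l : List α) (j : Nat)
    (h : j < 2 * l.length) :
    (l.flatMap (fun x => [f x, g x])).getD j 0
      = (if j % 2 = 0 then f (l.getD (j / 2) d) else g (l.getD (j / 2) d)) := by
  have hk : j / 2 < l.length := Nat.div_lt_of_lt_mul (by omega)
  have hfg := flat2_getD f g d l (j / 2) hk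
  by_cases hp : j % 2 = 0
  · rw [if_pos hp]
    calc (l.flatMap (fun x => [f x, g x])).getD j 0
        = (l.flatMap (fun x => [f x, g x])).getD (2 * (j / 2)) 0 := by
          congr 1; omega
      _ = f (l.getD (j / 2) d) := hfg.1
  · rw [if_neg hp]
    calc (l.flatMap (fun x => [f x, g x])).getD j 0
        = (l.flatMap (fun x => [f x, g x])).getD (2 * (j / 2) + 1) 0 := by
          congr 1; omega
      _ = g (l.getD (j / 2) d) := hfg.2

-- A's final join: map over range(0, 2n, 2) rewritten as a map over range n
theorem range2_map (n : Nat) (t : List Int) (h : t.length = 2 * n) (g : Int → Int → Char) :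
    (PySem.List.pyRange 0 ((t.length : Int)) 2).map (fun i =>
        g (PySem.List.pyGetD t i 0) (PySem.List.pyGetD t (i + 1) 0)) =
      (List.range n).map (fun k => g (t.getD (2 * k) 0) (t.getD (2 * k + 1) 0)) := by
  rw [PySem.List.pyRange_of_pos 0 ((t.length : Int)) (by norm_num), List.map_map]
  have hcnt : (if (0 : Int) < ((t.length : Int)) then
      ((((t.length : Int)) - 0 + 2 - 1) / 2).toNat else 0) = n := by
    rw [h]; push_cast; split_ifs with hh <;> omega
  rw [hcnt]
  apply List.map_congr_left
  intro k _
  simp only [Function.comp_apply]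
  have e1 : (0 : Int) + 2 * (k : Nat) = ((2 * k : Nat) : Int) := by push_cast; ring
  have e2 : ((2 * k : Nat) : Int) + 1 = ((2 * k + 1 : Nat) : Int) := by push_cast; ring
  rw [e1, e2, PySem.List.pyGetD_natCast, PySem.List.pyGetD_natCast]

-- ===== VERDICT (by name: the statement is the Claim_ definition above) =====
set_option maxHeartbeats 1000000 in
theorem bifid_spec : Claim_equal_bifid := by
  intro text _hDom hPre
  show bifid text = bifid_alt text
  unfold bifid bifid_alt
  rw [PySem.List.foldl_if_true_eq]
  by_cases hall : text.toList.all (fun c => PySem.Chars.isalpha c) = true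
  · -- DECODE branch
    have hany : (text.toList.any fun ele => !PySem.Chars.isalpha ele) = false := by
      simp only [List.any_eq_false]
      intro c hc
      simp [List.all_eq_true.mp hall c hc]
    rw [hany]
    simp only [Bool.or_false, if_neg (by simp : ¬ (false = true)), if_pos hall]
    have hcode : ∀ c ∈ text.toList, c ∈ bifidCodingList := by
      rcases hPre with hP | hP
      · exfalso
        rcases List.any_eq_true.mp hP with ⟨c, hc, hnc⟩
        have := List.all_eq_true.mp hall c hc
        simp [this] at hnc
      · intro c hc
        have := List.all_eq_true.mp hP c hc
        rw [← coding_string_eq]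
        simpa using this
    set cs := text.toList with hcs
    have hrcl : List.foldl (fun acc e =>
          acc ++ [(bifidTable.getD e (0, 0)).1] ++ [(bifidTable.getD e (0, 0)).2]) [] cs
        = cs.flatMap (fun e =>
            [(bifidTable.getD e (0, 0)).1, (bifidTable.getD e (0, 0)).2]) := by
      have h1 := PySem.List.foldl_congr_mem (l := cs) (init := ([] : List Int))
        (f := fun acc e => acc ++ [(bifidTable.getD e (0, 0)).1] ++ [(bifidTable.getD e (0, 0)).2])
        (g := fun acc e => acc ++ [(bifidTable.getD e (0, 0)).1, (bifidTable.getD e (0, 0)).2])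
        (by intro acc x hx; simp)
      rw [h1, PySem.List.foldl_append_eq_flatMap]
      simp
    rw [hrcl]
    set R := cs.flatMap (fun e =>
        [(bifidTable.getD e (0, 0)).1, (bifidTable.getD e (0, 0)).2]) with hR
    set L := cs.length with hL
    have hlenR : R.length = 2 * L := flat2_length _ _ cs
    have hfd : PySem.Int.floordiv ((R.length : Nat) : Int) 2 = ((L : Nat) : Int) := by
      rw [hlenR]; simp [PySem.Int.floordiv]
    rw [hfd]
    have htemp := PySem.List.foldl_congr_mem
        (l := PySem.List.pyRange 0 ((L : Nat) : Int))
        (init := ([] : List Int))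
        (f := fun acc i => acc ++ [PySem.List.pyGetD R i 0]
              ++ [PySem.List.pyGetD R (i + ((L : Nat) : Int)) 0])
        (g := fun acc i => acc ++ [PySem.List.pyGetD R i 0,
              PySem.List.pyGetD R (i + ((L : Nat) : Int)) 0])
        (by intro acc x hx; simp)
    rw [htemp, PySem.List.foldl_append_eq_flatMap, List.nil_append]
    have hLt : ((((L : Nat) : Int)) - 0).toNat = L := by omega
    rw [PySem.List.pyRange_one, hLt, List.flatMap_map]
    set T := (List.range L).flatMap
        (fun k : Nat => [PySem.List.pyGetD R ((0 : Int) + (k : Nat)) 0,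
                   PySem.List.pyGetD R ((0 : Int) + (k : Nat) + ((L : Nat) : Int)) 0]) with hT
    have hlenT : T.length = 2 * L := by
      rw [hT]
      have := flat2_length (fun k : Nat => PySem.List.pyGetD R ((0 : Int) + (k : Nat)) 0)
        (fun k : Nat => PySem.List.pyGetD R ((0 : Int) + (k : Nat) + ((L : Nat) : Int)) 0)
        (List.range L)
      simpa using this
    rw [range2_map L T hlenT (fun x y => bifidTableInv.getD (x, y) 'a')]
    -- B side was rewritten by the same pyRange_one step; compose its two maps
    rw [List.map_map]
    apply congrArg String.ofList
    apply List.map_congr_left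
    intro k hk
    have hkL : k < L := by simpa using hk
    -- common value of both coordinate streams at position j < 2L
    have hRval : ∀ j : Nat, j < 2 * L →
        R.getD j 0 = (if j % 2 = 0 then (bifidCoord (cs.getD (j / 2) 'a')).1
          else (bifidCoord (cs.getD (j / 2) 'a')).2) := by
      intro j hj
      have hmem : cs.getD (j / 2) 'a' ∈ bifidCodingList := by
        have hjl : j / 2 < cs.length := by omega
        apply hcode
        rw [List.getD_eq_getElem cs 'a' hjl]
        exact List.getElem_mem _
      have := flat2_getD_any (fun e => (bifidTable.getD e (0, 0)).1)
        (fun e => (bifidTable.getD e (0, 0)).2) 'a' cs j (by omega)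
      rw [hR, this]
      simp only [coding_coord _ hmem]
    have hTval : ∀ m : Nat, m < L →
        (T.getD (2 * m) 0 = R.getD m 0 ∧ T.getD (2 * m + 1) 0 = R.getD (m + L) 0) := by
      intro m hm
      have := flat2_getD (fun k : Nat => PySem.List.pyGetD R ((0 : Int) + (k : Nat)) 0)
        (fun k : Nat => PySem.List.pyGetD R ((0 : Int) + (k : Nat) + ((L : Nat) : Int)) 0)
        0 (List.range L) m (by simpa using hm)
      have hg : (List.range L).getD m 0 = m := by
        rw [List.getD_eq_getElem _ 0 (by simpa using hm), List.getElem_range]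
      constructor
      · rw [hT, this.1, hg]
        show PySem.List.pyGetD R ((0 : Int) + (m : Nat)) 0 = R.getD m 0
        have e : (0 : Int) + (m : Nat) = ((m : Nat) : Int) := by ring
        rw [e, PySem.List.pyGetD_natCast]
      · rw [hT, this.2, hg]
        show PySem.List.pyGetD R ((0 : Int) + (m : Nat) + ((L : Nat) : Int)) 0 = R.getD (m + L) 0
        have e : (0 : Int) + (m : Nat) + ((L : Nat) : Int) = ((m + L : Nat) : Int) := by
          push_cast; ring
        rw [e, PySem.List.pyGetD_natCast]
    -- B's f at a natural-number index
    have hBf : ∀ j : Nat, j < 2 * L →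
        (let p := bifidCoord (PySem.List.pyGetD cs
            (PySem.Int.floordiv ((0 : Int) + (j : Nat)) 2) 'a')
         if PySem.Int.mod ((0 : Int) + (j : Nat)) 2 = 0 then p.1 else p.2)
        = (if j % 2 = 0 then (bifidCoord (cs.getD (j / 2) 'a')).1
          else (bifidCoord (cs.getD (j / 2) 'a')).2) := by
      intro j hj
      have e : (0 : Int) + (j : Nat) = ((j : Nat) : Int) := by ring
      have hfd2 : PySem.Int.floordiv ((j : Nat) : Int) 2 = ((j / 2 : Nat) : Int) := by
        exact_mod_cast PySem.Int.floordiv_natCast j 2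
      have hmd2 : PySem.Int.mod ((j : Nat) : Int) 2 = ((j % 2 : Nat) : Int) := by
        exact_mod_cast PySem.Int.mod_natCast j 2
      rw [e, hfd2, hmd2, PySem.List.pyGetD_natCast]
      by_cases hp : j % 2 = 0
      · rw [if_pos hp, if_pos (show ((j % 2 : Nat) : Int) = 0 by exact_mod_cast hp)]
      · rw [if_neg hp, if_neg (show ¬ ((j % 2 : Nat) : Int) = 0 by exact_mod_cast hp)]
    have ht1 := (hTval k hkL).1
    have ht2 := (hTval k hkL).2
    have hr1 := hRval k (by omega)
    have hr2 := hRval (k + L) (by omega)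
    have hb1 := hBf k (by omega)
    have hb2' : ((0 : Int) + (k : Nat)) + ((cs.length : Nat) : Int)
        = (0 : Int) + ((k + L : Nat) : Int) := by push_cast; omega
    have hb2 := hBf (k + L) (by omega)
    simp only [Function.comp_apply]
    rw [ht1, ht2, hr1, hr2, hb2', hb2, hb1]
    -- both coordinates are table values in range after rewriting coord back to the table
    have hmem1 : cs.getD (k / 2) 'a' ∈ bifidCodingList := by
      apply hcode; rw [List.getD_eq_getElem cs 'a' (by omega)]; exact List.getElem_mem _
    have hmem2 : cs.getD ((k + L) / 2) 'a' ∈ bifidCodingList := by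
      apply hcode; rw [List.getD_eq_getElem cs 'a' (by omega)]; exact List.getElem_mem _
    rw [← coding_coord _ hmem1, ← coding_coord _ hmem2]
    have r1 := bifid_getD_range (cs.getD (k / 2) 'a')
    have r2 := bifid_getD_range (cs.getD ((k + L) / 2) 'a')
    split_ifs
    · exact inv_eq_letter _ _ r1.1 r1.2.1 r2.1 r2.2.1
    · exact inv_eq_letter _ _ r1.1 r1.2.1 r2.2.2.1 r2.2.2.2
    · exact inv_eq_letter _ _ r1.2.2.1 r1.2.2.2 r2.1 r2.2.1
    · exact inv_eq_letter _ _ r1.2.2.1 r1.2.2.2 r2.2.2.1 r2.2.2.2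
  · -- ENCODE branch
    have hany : (text.toList.any fun ele => !PySem.Chars.isalpha ele) = true := by
      rcases List.all_eq_false.mp (Bool.eq_false_iff.mpr hall) with ⟨c, hc, hnc⟩
      exact List.any_eq_true.mpr ⟨c, hc, by simpa using hnc⟩
    rw [hany]
    simp only [Bool.or_true, if_neg hall]
    simp only [if_true]
    rw [PySem.List.foldl_append_singleton_eq_map
      (f := fun e => bifidTable.getD
        (if PySem.Chars.lowerChar e = 'j' then 'i' else PySem.Chars.lowerChar e) (0, 0))]
    rw [List.nil_append]
    set lettersB := (List.filter (fun i => PySem.Chars.isalpha i) text.toList).map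
        (fun c => if PySem.Chars.lowerChar c = 'j' then 'i' else PySem.Chars.lowerChar c)
      with hLB
    have hlmem : ∀ x ∈ lettersB, bifidTable.getD x (0, 0) = bifidCoord x := by
      intro x hx
      rw [hLB] at hx
      rcases List.mem_map.mp hx with ⟨c, hc, hcx⟩
      have halpha : PySem.Chars.isalpha c = true := (List.mem_filter.mp hc).2
      rw [← hcx]
      exact (alpha_fold_facts c halpha).2
    have hrcl : (List.map (fun i => PySem.Chars.lowerChar i)
          (List.filter (fun i => PySem.Chars.isalpha i) text.toList)).map
          (fun e => bifidTable.getD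
            (if PySem.Chars.lowerChar e = 'j' then 'i' else PySem.Chars.lowerChar e) (0, 0))
        = lettersB.map (fun c => bifidTable.getD c (0, 0)) := by
      rw [hLB, List.map_map, List.map_map]
      apply List.map_congr_left
      intro c _
      simp only [Function.comp_apply, lowerChar_idem]
    rw [hrcl]
    have h01 : PySem.List.pyRange 0 2 = [0, 1] := by decide
    rw [h01]
    have hflat : ∀ (l : List (Int × Int)),
        List.flatMap (fun i : Int => l.map (fun e => if i = 0 then e.1 else e.2)) [0, 1]
          = l.map (fun e => e.1) ++ l.map (fun e => e.2) := by
      intro l; simp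
    rw [hflat]
    have hA1 : List.map (fun e : Int × Int => e.1)
        (lettersB.map (fun c => bifidTable.getD c (0, 0)))
        = lettersB.map (fun c => (bifidTable.getD c (0, 0)).1) := by
      rw [List.map_map]; rfl
    have hA2 : List.map (fun e : Int × Int => e.2)
        (lettersB.map (fun c => bifidTable.getD c (0, 0)))
        = lettersB.map (fun c => (bifidTable.getD c (0, 0)).2) := by
      rw [List.map_map]; rfl
    rw [hA1, hA2]
    set m := lettersB.length with hm
    set S := lettersB.map (fun c => (bifidTable.getD c (0, 0)).1)
        ++ lettersB.map (fun c => (bifidTable.getD c (0, 0)).2) with hS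
    have hlenS : S.length = 2 * m := by rw [hS]; simp; omega
    rw [range2_map m S hlenS (fun x y => bifidTableInv.getD (x, y) 'a')]
    rw [PySem.List.pyRange_one, List.map_map]
    have hcast : ((((m : Nat) : Int)) - 0).toNat = m := by omega
    rw [hcast]
    apply congrArg String.ofList
    apply List.map_congr_left
    intro k hk
    have hkm : k < m := by simpa using hk
    have hmpos : 0 < m := by omega
    -- the virtual stream value at j < 2m, on both sides
    have hSval : ∀ j : Nat, j < 2 * m →
        S.getD j 0 = (if j / m = 0 then (bifidCoord (lettersB.getD (j % m) 'a')).1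
          else (bifidCoord (lettersB.getD (j % m) 'a')).2) := by
      intro j hj
      by_cases hjm : j < m
      · have hd : j / m = 0 := Nat.div_eq_of_lt hjm
        have hmod : j % m = j := Nat.mod_eq_of_lt hjm
        rw [hS, List.getD_append _ _ _ _ (by simpa using hjm), hd, if_pos rfl, hmod]
        rw [List.getD_eq_getElem _ 0 (by simpa using hjm), List.getElem_map,
          List.getD_eq_getElem _ 'a' hjm]
        rw [hlmem _ (List.getElem_mem _)]
      · have hge : m ≤ j := by omega
        have hd : j / m = 1 := by
          have h1 : 1 ≤ j / m := (Nat.one_le_div_iff hmpos).mpr hge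
          have h2 : j / m < 2 := Nat.div_lt_of_lt_mul (by omega)
          omega
        have hmod : j % m = j - m := by
          rw [Nat.mod_eq_sub_mod hge, Nat.mod_eq_of_lt (by omega)]
        rw [hS, List.getD_append_right _ _ _ _ (by simpa using hge), hd, hmod]
        simp only [List.length_map]
        have hjm2 : j - m < m := by omega
        rw [List.getD_eq_getElem _ 0 (by simpa using hjm2), List.getElem_map,
          List.getD_eq_getElem _ 'a' hjm2]
        rw [hlmem _ (List.getElem_mem _), if_neg (by omega : ¬ (1 : Nat) = 0)]
    -- B's g at a natural-number index
    have hBg : ∀ j : Nat, j < 2 * m →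
        (let p := bifidCoord (PySem.List.pyGetD lettersB
            (PySem.Int.mod ((j : Nat) : Int) ((m : Nat) : Int)) 'a')
         if PySem.Int.floordiv ((j : Nat) : Int) ((m : Nat) : Int) = 0 then p.1 else p.2)
        = (if j / m = 0 then (bifidCoord (lettersB.getD (j % m) 'a')).1
          else (bifidCoord (lettersB.getD (j % m) 'a')).2) := by
      intro j hj
      simp only [PySem.Int.floordiv_natCast, PySem.Int.mod_natCast, PySem.List.pyGetD_natCast]
      by_cases hp : j / m = 0
      · rw [if_pos hp, if_pos (by exact_mod_cast congrArg (Nat.cast : Nat → Int) hp)]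
      · rw [if_neg hp, if_neg (by exact_mod_cast fun hc => hp (by exact_mod_cast hc))]
    have e1 : 2 * ((0 : Int) + (k : Nat)) = (((2 * k : Nat) : Nat) : Int) := by push_cast; ring
    have e2 : 2 * ((0 : Int) + (k : Nat)) + 1 = (((2 * k + 1 : Nat) : Nat) : Int) := by
      push_cast; ring
    simp only [Function.comp_apply]
    rw [e2, e1]
    have hb1 := hBg (2 * k) (by omega)
    have hb2 := hBg (2 * k + 1) (by omega)
    rw [hb1, hb2, hSval (2 * k) (by omega), hSval (2 * k + 1) (by omega)]
    -- rewrite coord back to the table to get the range facts, then apply inv_eq_letter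
    have hre : ∀ j : Nat, j < 2 * m →
        bifidCoord (lettersB.getD (j % m) 'a')
          = bifidTable.getD (lettersB.getD (j % m) 'a') (0, 0) := by
      intro j hj
      have : j % m < m := Nat.mod_lt _ hmpos
      rw [hlmem _ (by rw [List.getD_eq_getElem _ 'a' this]; exact List.getElem_mem _)]
    rw [hre (2 * k) (by omega), hre (2 * k + 1) (by omega)]
    have r1 := bifid_getD_range (lettersB.getD ((2 * k) % m) 'a')
    have r2 := bifid_getD_range (lettersB.getD ((2 * k + 1) % m) 'a')
    split_ifs
    · exact inv_eq_letter _ _ r1.1 r1.2.1 r2.1 r2.2.1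
    · exact inv_eq_letter _ _ r1.1 r1.2.1 r2.2.2.1 r2.2.2.2
    · exact inv_eq_letter _ _ r1.2.2.1 r1.2.2.2 r2.1 r2.2.1
    · exact inv_eq_letter _ _ r1.2.2.1 r1.2.2.2 r2.2.2.1 r2.2.2.2
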